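-- pv_equiv track=rewrite | github.com/hoonably/PS | 백준/Diamond/13926. gcd（n， k） ＝ 1/gcd（n， k） ＝ 1.py | pola
-- ===== SOURCE A (Python) =====
-- def powmod(a,b,m):
--     result = 1
--     while b > 0:
--         if b % 2 != 0:
--             result = (result * a) % m
--         b //= 2
--         a = (a * a) % m
--
--     return result
--
-- def mr(n,a):
--     r = 0
--     d = n-1
--     while (d%2 == 0):
--         r += 1
--         d = d // 2
--     x = powmod(a,d,n)
--     # a의 d제곱을 n으로 나눈 나머지가 +-1 이면 True
--     if x == 1 or x == n-1:
--         return True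
--     for i in range(0,r-1):
--         x = powmod(x,2,n)
--         if x == n-1:
--             return True
--     return False
--
-- def check_prime(k):
--     check = 0
--     # 작은수에서
--     if k <= 71:
--         if k in [2, 3, 5, 7, 11, 13, 17, 19, 23, 29, 31, 37, 41, 43, 47, 53, 59, 61, 67, 71]:
--             return True
--         else:
--             return False
--     # 큰 수에서
--     else:
--         for i in [ 2, 3, 5, 7, 11, 13, 17, 19, 23, 29, 31, 37]:
--             if mr(k,i) == False:
--                 return False
--         # 위의 12개의 소수들을 k로 나눈 나머지가 다 True면 소수로 취급
--         return True
--
-- def gcd(a, b):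
--     while b > 0:
--         a, b = b, a % b
--     return a
--
-- def g(x,n):
--     return (x**2 + 1) % n
--
-- def pola(n,x):
--     p = x
--     if check_prime(n):
--         return n
--     else:
--         for i in [2, 3, 5, 7, 11, 13, 17, 19, 23, 29, 31, 37, 41, 43, 47, 53, 59, 61, 67, 71]:
--             if n % i == 0:
--                 return i
--         y = x
--         d = 1
--         while d == 1:
--             x = g(x,n)
--             y = g(g(y,n),n)
--             d = gcd(abs(x-y),n)
--         if d == n:
--             return pola(n,p+1)
--         else:
--             if check_prime(d):
--                 return d
--             else:
--                 return pola(d,2)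
-- ===== SOURCE B (Python) =====
-- SMALL = [2, 3, 5, 7, 11, 13, 17, 19, 23, 29, 31, 37, 41, 43, 47, 53, 59, 61, 67, 71]
-- BASES = [2, 3, 5, 7, 11, 13, 17, 19, 23, 29, 31, 37]
--
-- def powmod(a, b, m):
--     # recursive binary exponentiation (A uses an iterative accumulator loop)
--     if b <= 0:
--         return 1
--     h = powmod(a * a % m, b // 2, m)
--     return h * a % m if b % 2 != 0 else h
--
-- def mr(n, a):
--     d, r = n - 1, 0
--     while d % 2 == 0:
--         d //= 2
--         r += 1
--     x = powmod(a, d, n)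
--     if x == 1 or x == n - 1:
--         return True
--     for _ in range(r - 1):
--         x = x * x % n          # direct modular square instead of powmod(x, 2, n)
--         if x == n - 1:
--             return True
--     return False
--
-- def check_prime(k):
--     if k <= 71:
--         # arithmetic test instead of A's 20-element membership list:
--         # a composite k <= 71 has a prime factor <= sqrt(71) < 8
--         return k >= 2 and (k in (2, 3, 5, 7) or all(k % p for p in (2, 3, 5, 7)))
--     return all(mr(k, b) for b in BASES)
--
-- def gcd(a, b):
--     return a if b <= 0 else gcd(b, a % b)
--
-- def pola(n, x):
--     seed = x
--     fresh = True               # iterative state machine instead of A's recursion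
--     while True:
--         if fresh:
--             if check_prime(n):
--                 return n
--             hit = next((p for p in SMALL if n % p == 0), None)
--             if hit is not None:
--                 return hit
--             fresh = False
--         a = b = seed
--         d = 1
--         while d == 1:
--             a = (a * a + 1) % n
--             b = (b * b + 1) % n
--             b = (b * b + 1) % n
--             d = gcd(abs(a - b), n)
--         if d == n:
--             seed += 1          # mirrors pola(n, p+1)
--         elif check_prime(d):
--             return d
--         else:
--             n, seed, fresh = d, 2, True   # mirrors pola(d, 2)
-- ===== Notes on version B (the rewrite author's own statement) =====
-- stated objective: alternative
-- what changed: A's recursive driver is replaced by an iterative state machine over (n, seed, fresh); powmod is rewritten as recursive binary exponentiation instead of A's accumulator loop, the small-prime test becomes an arithmetic divisibility check (2 <= k and no factor among 2,3,5,7) instead of a 20-element membership list, the Miller-Rabin witness loop squares directly with x*x % n instead of calling powmod(x,2,n), gcd is recursive, and trial division uses next() over a generator.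
import Mathlib
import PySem

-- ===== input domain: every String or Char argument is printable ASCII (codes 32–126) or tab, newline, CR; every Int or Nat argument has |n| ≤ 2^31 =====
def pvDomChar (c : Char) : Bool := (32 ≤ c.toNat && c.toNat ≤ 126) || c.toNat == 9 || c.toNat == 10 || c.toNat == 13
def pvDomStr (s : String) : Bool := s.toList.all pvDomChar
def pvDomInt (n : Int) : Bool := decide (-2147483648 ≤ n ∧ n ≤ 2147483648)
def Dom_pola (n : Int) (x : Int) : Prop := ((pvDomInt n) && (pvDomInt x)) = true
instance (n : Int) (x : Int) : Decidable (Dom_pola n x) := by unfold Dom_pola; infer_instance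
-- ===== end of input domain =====

-- B re-decomposes A: recursive binary powmod instead of A's accumulator loop, an arithmetic
-- small-prime test instead of the 20-element membership list, a direct modular square in the
-- Miller–Rabin witness loop, a recursive gcd, and an iterative state machine replacing A's
-- recursive driver; same Pollard-rho factor is returned.

-- ===== PORT A =====
def pvSmall : List Int := [2, 3, 5, 7, 11, 13, 17, 19, 23, 29, 31, 37, 41, 43, 47, 53, 59, 61, 67, 71]
def pvBases : List Int := [2, 3, 5, 7, 11, 13, 17, 19, 23, 29, 31, 37]

-- powmod's while-loop (b halves while positive)
def powmodLoop (result a b m : Int) : Int :=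
  if h : 0 < b then
    powmodLoop (if PySem.Int.mod b 2 ≠ 0 then PySem.Int.mod (result * a) m else result)
      (PySem.Int.mod (a * a) m) (PySem.Int.floordiv b 2) m
  else result
termination_by b.toNat
decreasing_by
  rw [PySem.Int.floordiv_eq_ediv_of_pos (by omega : (0:Int) < 2)]
  omega

def powmod (a b m : Int) : Int := powmodLoop 1 a b m

-- mr's first loop: strip factors of two from d (fueled; every reachable call needs < 64 steps)
-- (identical source in Source A and Source B; shared by both ports)
def mrHalve : Nat → Int → Int → Int × Int
  | 0, r, d => (r, d)
  | f + 1, r, d =>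
    if PySem.Int.mod d 2 = 0 then mrHalve f (r + 1) (PySem.Int.floordiv d 2) else (r, d)

-- mr's 'for i in range(0, r-1)' squaring loop, squaring via powmod(x, 2, n)
def mrLoop (n : Int) : Nat → Int → Bool
  | 0, _ => false
  | k + 1, x =>
    let x' := powmod x 2 n
    if x' = n - 1 then true else mrLoop n k x'

def mr (n a : Int) : Bool :=
  let rd := mrHalve 64 0 (n - 1)
  let x := powmod a rd.2 n
  if x = 1 ∨ x = n - 1 then true
  else mrLoop n (rd.1 - 1).toNat x

-- A's check_prime: membership list for small k, early-return loop over the MR bases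
def mrAll (k : Int) : List Int → Bool
  | [] => true
  | i :: rest => if mr k i = false then false else mrAll k rest

def checkPrime (k : Int) : Bool :=
  if k ≤ 71 then (if pvSmall.contains k then true else false)
  else mrAll k pvBases

-- A's gcd: while-loop
def gcdI (a b : Int) : Int :=
  if h : 0 < b then gcdI b (PySem.Int.mod a b) else a
termination_by b.toNat
decreasing_by
  rw [PySem.Int.mod_eq_emod_of_pos h]
  have h1 := Int.emod_nonneg a (by omega : b ≠ 0)
  have h2 := Int.emod_lt_of_pos a h
  omega

def gI (x n : Int) : Int := PySem.Int.mod (x * x + 1) n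

-- the 'while d == 1' rho loop (fueled: Python diverges here exactly when the fuel would run out)
def rhoLoop : Nat → Int → Int → Int → Option Int
  | 0, _, _, _ => none
  | f + 1, n, x, y =>
    let x' := gI x n
    let y' := gI (gI y n) n
    let d := gcdI |x' - y'| n
    if d = 1 then rhoLoop f n x' y' else some d

-- A's trial-division for-loop with early return
def firstDiv (n : Int) : List Int → Option Int
  | [] => none
  | i :: rest => if PySem.Int.mod n i = 0 then some i else firstDiv n rest

def pvRhoFuel : Nat := 8589934592
def pvFuel : Nat := 1000000

-- A's recursive driver, fueled (one unit per recursive pola call)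
def polaF : Nat → Int → Int → Int
  | 0, _, _ => 0
  | f + 1, n, x =>
    if checkPrime n then n
    else
      match firstDiv n pvSmall with
      | some i => i
      | none =>
        match rhoLoop pvRhoFuel n x x with
        | none => 0
        | some d =>
          if d = n then polaF f n (x + 1)
          else if checkPrime d then d
          else polaF f d 2

def pola (n : Int) (x : Int) : Int := polaF pvFuel n x

-- ===== PORT B =====
-- B's powmod: recursive binary exponentiation
def powmodB (a b m : Int) : Int :=
  if h : 0 < b then
    let h2 := powmodB (PySem.Int.mod (a * a) m) (PySem.Int.floordiv b 2) m
    if PySem.Int.mod b 2 ≠ 0 then PySem.Int.mod (h2 * a) m else h2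
  else 1
termination_by b.toNat
decreasing_by
  rw [PySem.Int.floordiv_eq_ediv_of_pos (by omega : (0:Int) < 2)]
  omega

-- B's witness loop: direct modular square x*x % n
def mrLoopB (n : Int) : Nat → Int → Bool
  | 0, _ => false
  | k + 1, x =>
    let x' := PySem.Int.mod (x * x) n
    if x' = n - 1 then true else mrLoopB n k x'

def mrB (n a : Int) : Bool :=
  let rd := mrHalve 64 0 (n - 1)
  let x := powmodB a rd.2 n
  if x = 1 ∨ x = n - 1 then true
  else mrLoopB n (rd.1 - 1).toNat x

-- B's check_prime: arithmetic test for k ≤ 71, all() over the bases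
def checkPrimeB (k : Int) : Bool :=
  if k ≤ 71 then
    decide (2 ≤ k) &&
      (decide (k = 2 ∨ k = 3 ∨ k = 5 ∨ k = 7) ||
        (decide (PySem.Int.mod k 2 ≠ 0) && decide (PySem.Int.mod k 3 ≠ 0) &&
         decide (PySem.Int.mod k 5 ≠ 0) && decide (PySem.Int.mod k 7 ≠ 0)))
  else pvBases.all (fun i => mrB k i)

-- B's gcd: recursion
def gcdB (a b : Int) : Int :=
  if h : b ≤ 0 then a else gcdB b (PySem.Int.mod a b)
termination_by b.toNat
decreasing_by
  rw [PySem.Int.mod_eq_emod_of_pos (by omega : 0 < b)]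
  have h1 := Int.emod_nonneg a (by omega : b ≠ 0)
  have h2 := Int.emod_lt_of_pos a (by omega : 0 < b)
  omega

-- B's rho loop with the iteration function inlined
def rhoLoopB : Nat → Int → Int → Int → Option Int
  | 0, _, _, _ => none
  | f + 1, n, a, b =>
    let a' := PySem.Int.mod (a * a + 1) n
    let b1 := PySem.Int.mod (b * b + 1) n
    let b' := PySem.Int.mod (b1 * b1 + 1) n
    let d := gcdB |a' - b'| n
    if d = 1 then rhoLoopB f n a' b' else some d

-- B's next((p for p in SMALL if n % p == 0), None)
def findDivB (n : Int) : Option Int :=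
  pvSmall.find? (fun i => PySem.Int.mod n i == 0)

-- B's single while-True loop: state (n, seed, fresh); fresh = re-run the checks
def altGo (f : Nat) (fresh : Bool) (n seed : Int) : Int :=
  match f, fresh with
  | 0, _ => 0
  | f + 1, true =>
    if checkPrimeB n then n
    else
      match findDivB n with
      | some i => i
      | none => altGo (f + 1) false n seed
  | f + 1, false =>
    match rhoLoopB pvRhoFuel n seed seed with
    | none => 0
    | some d =>
      if d = n then altGo f false n (seed + 1)
      else if checkPrimeB d then d
      else altGo f true d 2
termination_by 2 * f + (if fresh then 1 else 0)
decreasing_by all_goals (first | omega | (simp; omega) | simp)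

def pola_alt (n : Int) (x : Int) : Int := altGo pvFuel true n x

-- ===== PRECONDITION & SPEC =====
def Spec_pola (n : Int) (x : Int) (out : Int) : Prop := out = pola_alt n x
instance (n : Int) (x : Int) (out : Int) : Decidable (Spec_pola n x out) := by unfold Spec_pola; infer_instance

-- ===== CLAIM =====
def Claim_equal_pola : Prop := ∀ (n : Int) (x : Int), Dom_pola n x → Spec_pola n x (pola n x)

-- ===== LEMMAS AND PROOFS =====

theorem gcd_eq (a b : Int) : gcdI a b = gcdB a b := by
  rw [gcdI, gcdB]
  by_cases h : 0 < b
  · rw [dif_pos h, dif_neg (by omega : ¬ b ≤ 0)]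
    exact gcd_eq b (PySem.Int.mod a b)
  · rw [dif_neg h, dif_pos (by omega : b ≤ 0)]
termination_by b.toNat
decreasing_by
  rw [PySem.Int.mod_eq_emod_of_pos h]
  have h1 := Int.emod_nonneg a (by omega : b ≠ 0)
  have h2 := Int.emod_lt_of_pos a h
  omega

-- the result of B's powmod is already reduced mod m (for positive exponent)
theorem powmodB_emod (a b m : Int) (hm : 0 < m) (hb : 0 < b) :
    PySem.Int.mod (powmodB a b m) m = powmodB a b m := by
  rw [powmodB, dif_pos hb]
  by_cases hodd : PySem.Int.mod b 2 ≠ 0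
  · rw [if_pos hodd]
    rw [PySem.Int.mod_eq_emod_of_pos hm, PySem.Int.mod_eq_emod_of_pos hm]
    exact Int.emod_emod_of_dvd _ dvd_rfl
  · rw [if_neg hodd]
    have hb2 : 0 < PySem.Int.floordiv b 2 := by
      rw [PySem.Int.floordiv_eq_ediv_of_pos (by omega : (0:Int) < 2)]
      rw [PySem.Int.mod_eq_emod_of_pos (by omega : (0:Int) < 2)] at hodd
      omega
    exact powmodB_emod _ _ m hm hb2
termination_by b.toNat
decreasing_by
  rw [PySem.Int.floordiv_eq_ediv_of_pos (by omega : (0:Int) < 2)]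
  omega

-- A's accumulator loop computes r · powmodB a b m (mod m)
theorem powmod_loop_eq (m : Int) (hm : 0 < m) (b : Int) (hb : 0 < b) (r a : Int) :
    powmodLoop r a b m = (r * powmodB a b m) % m := by
  rw [powmodLoop, dif_pos hb, powmodB, dif_pos hb]
  have e2 : PySem.Int.floordiv b 2 = b / 2 :=
    PySem.Int.floordiv_eq_ediv_of_pos (by omega : (0:Int) < 2)
  have m2 : PySem.Int.mod b 2 = b % 2 :=
    PySem.Int.mod_eq_emod_of_pos (by omega : (0:Int) < 2)
  by_cases hb2 : 0 < PySem.Int.floordiv b 2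
  · have ih := powmod_loop_eq m hm (PySem.Int.floordiv b 2) hb2
    by_cases hodd : PySem.Int.mod b 2 ≠ 0
    · rw [if_pos hodd, if_pos hodd, ih]
      simp only [PySem.Int.mod_eq_emod_of_pos hm]
      conv_lhs => rw [Int.mul_emod, Int.emod_emod_of_dvd _ dvd_rfl, ← Int.mul_emod]
      conv_rhs => rw [Int.mul_emod, Int.emod_emod_of_dvd _ dvd_rfl, ← Int.mul_emod]
      ring_nf
    · rw [if_neg hodd, if_neg hodd, ih]
  · -- b = 1: the loop ends, powmodB's recursive call has exponent 0
    have hb1 : b = 1 := by rw [e2] at hb2; omega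
    subst hb1
    have hodd : PySem.Int.mod (1:Int) 2 ≠ 0 := by decide
    rw [if_pos hodd, if_pos hodd]
    have e0 : PySem.Int.floordiv (1:Int) 2 = 0 := by decide
    rw [e0, powmodLoop, dif_neg (by omega : ¬ (0:Int) < 0),
        powmodB, dif_neg (by omega : ¬ (0:Int) < 0)]
    simp only [PySem.Int.mod_eq_emod_of_pos hm, one_mul]
    conv_rhs => rw [Int.mul_emod, Int.emod_emod_of_dvd _ dvd_rfl, ← Int.mul_emod]
termination_by b.toNat
decreasing_by
  rw [PySem.Int.floordiv_eq_ediv_of_pos (by omega : (0:Int) < 2)]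
  omega

theorem powmod_eq (a b m : Int) (hm : 0 < m) : powmod a b m = powmodB a b m := by
  by_cases hb : 0 < b
  · rw [powmod, powmod_loop_eq m hm b hb, one_mul,
        ← PySem.Int.mod_eq_emod_of_pos hm, powmodB_emod a b m hm hb]
  · rw [powmod, powmodLoop, dif_neg hb, powmodB, dif_neg hb]

theorem powmod_two (x n : Int) (hn : 0 < n) :
    powmod x 2 n = PySem.Int.mod (x * x) n := by
  rw [powmod_eq x 2 n hn, powmodB, dif_pos (by omega : (0:Int) < 2)]
  have h0 : ¬ PySem.Int.mod (2:Int) 2 ≠ 0 := by decide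
  rw [if_neg h0]
  have e1 : PySem.Int.floordiv (2:Int) 2 = 1 := by decide
  rw [e1, powmodB, dif_pos (by omega : (0:Int) < 1)]
  have h1 : PySem.Int.mod (1:Int) 2 ≠ 0 := by decide
  rw [if_pos h1]
  have e0 : PySem.Int.floordiv (1:Int) 2 = 0 := by decide
  rw [e0, powmodB, dif_neg (by omega : ¬ (0:Int) < 0), one_mul]
  simp only [PySem.Int.mod_eq_emod_of_pos hn]
  exact Int.emod_emod_of_dvd _ dvd_rfl

theorem mrLoop_eq (n : Int) (hn : 0 < n) : ∀ k x, mrLoop n k x = mrLoopB n k x := by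
  intro k
  induction k with
  | zero => intro x; rfl
  | succ k ih =>
    intro x
    simp only [mrLoop, mrLoopB, powmod_two _ n hn]
    split
    · rfl
    · exact ih _

theorem mr_eq (n a : Int) (hn : 0 < n) : mr n a = mrB n a := by
  simp only [mr, mrB, powmod_eq _ _ n hn, mrLoop_eq n hn]

theorem mrAll_eq_all (k : Int) (l : List Int) : mrAll k l = l.all (fun i => mr k i) := by
  induction l with
  | nil => rfl
  | cons i rest ih =>
    simp only [mrAll, List.all_cons, ih]
    cases h : mr k i <;> simp [h]

theorem checkPrime_eq (k : Int) : checkPrime k = checkPrimeB k := by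
  unfold checkPrime checkPrimeB
  by_cases h : k ≤ 71
  · rw [if_pos h, if_pos h]
    by_cases h2 : 2 ≤ k
    · interval_cases k <;> decide
    · have hc : pvSmall.contains k = false := by
        simp only [pvSmall, List.contains_cons, List.contains_nil,
          Bool.or_eq_false_iff, beq_eq_false_iff_ne, ne_eq, and_true]
        omega
      rw [if_neg (by rw [hc]; exact Bool.false_ne_true)]
      have hd : decide (2 ≤ k) = false := by simp [h2]
      rw [hd, Bool.false_and]
  · rw [if_neg h, if_neg h, mrAll_eq_all]
    have hmr : ∀ a, mr k a = mrB k a := fun a => mr_eq k a (by omega)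
    simp only [hmr]

theorem firstDiv_eq_find? (n : Int) (l : List Int) :
    firstDiv n l = l.find? (fun i => PySem.Int.mod n i == 0) := by
  induction l with
  | nil => rfl
  | cons i rest ih =>
    by_cases h : PySem.Int.mod n i = 0
    · simp [firstDiv, List.find?, h]
    · have hb : (PySem.Int.mod n i == 0) = false := by simp [h]
      simp [firstDiv, List.find?, h, hb, ih]

theorem firstDiv_eq_findDivB (n : Int) : firstDiv n pvSmall = findDivB n :=
  firstDiv_eq_find? n pvSmall

theorem rho_eq (f : Nat) : ∀ n x y, rhoLoop f n x y = rhoLoopB f n x y := by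
  induction f with
  | zero => intro n x y; rfl
  | succ f ih =>
    intro n x y
    simp only [rhoLoop, rhoLoopB, gI, gcd_eq]
    split
    · exact ih _ _ _
    · rfl

-- lock-step equivalence of the two drivers: A's recursion depth equals B's restart count
theorem drivers_eq (f : Nat) :
    (∀ n x, polaF f n x = altGo f true n x) ∧
    (∀ n x, checkPrime n = false → firstDiv n pvSmall = none →
      polaF f n x = altGo f false n x) := by
  induction f with
  | zero => exact ⟨fun n x => by simp [polaF, altGo], fun n x _ _ => by simp [polaF, altGo]⟩
  | succ f ih =>
    have hBt : ∀ n x, altGo (f + 1) true n x =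
        (if checkPrimeB n = true then n
         else match findDivB n with
           | some i => i
           | none => altGo (f + 1) false n x) := by
      intro n x; rw [altGo]
    have hrho : ∀ n x, checkPrime n = false → firstDiv n pvSmall = none →
        polaF (f + 1) n x = altGo (f + 1) false n x := by
      intro n x hc hd
      rw [altGo]
      simp only [polaF, hc, Bool.false_eq_true, if_false, hd]
      rw [rho_eq]
      cases hr : rhoLoopB pvRhoFuel n x x with
      | none => rfl
      | some d =>
        show (if d = n then polaF f n (x + 1)
              else if checkPrime d = true then d else polaF f d 2) =
             (if d = n then altGo f false n (x + 1)
              else if checkPrimeB d = true then d else altGo f true d 2)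
        by_cases hdn : d = n
        · rw [if_pos hdn, if_pos hdn]
          exact ih.2 n (x + 1) hc hd
        · rw [if_neg hdn, if_neg hdn, checkPrime_eq]
          by_cases hp : checkPrimeB d = true
          · rw [if_pos hp, if_pos hp]
          · rw [if_neg hp, if_neg hp]
            exact ih.1 d 2
    refine ⟨?_, hrho⟩
    intro n x
    have hc' : checkPrime n = checkPrimeB n := checkPrime_eq n
    by_cases hp : checkPrimeB n = true
    · rw [hBt, if_pos hp]
      simp only [polaF, hc', hp, if_true]
    · cases hfd : firstDiv n pvSmall with
      | some i =>
        have hfd' : findDivB n = some i := by rw [← firstDiv_eq_findDivB]; exact hfd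
        rw [hBt, if_neg hp, hfd']
        simp only [polaF, hc', hp, Bool.false_eq_true, if_false, hfd]
      | none =>
        have hcf : checkPrime n = false := by
          rw [hc']; cases h2 : checkPrimeB n
          · rfl
          · exact absurd h2 hp
        have hfd' : findDivB n = none := by rw [← firstDiv_eq_findDivB]; exact hfd
        rw [hrho n x hcf hfd, hBt, if_neg hp, hfd']

-- ===== VERDICT =====
theorem pola_spec : Claim_equal_pola := by
  intro n x _
  unfold Spec_pola pola pola_alt
  exact (drivers_eq pvFuel).1 n x
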